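-- pv_equiv track=rewrite | github.com/wafaefacafa/StyleSphere | convert_conversation.py | parse_text_transcript
-- ===== SOURCE A (Python) =====
-- def parse_text_transcript(text):
--     """
--     Parse a long string containing a transcript (e.g. User: ... AI: ...)
--     Returns a list of dicts with role/content.
--     """
--     messages = []
--     lines = text.split('\n')
--     current_role = None
--     current_content = []
--
--     # Heuristics for role markers
--     role_markers = {
--         "User:": "user",
--         "Human:": "user",
--         "AI:": "assistant",
--         "Assistant:": "assistant",
--         "System:": "system",
--         "Input:": "user",         # Google AI Studio common label
--         "input:": "user",
--         "Output:": "assistant",   # Google AI Studio common label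
--         "output:": "assistant",
--         "Model:": "assistant",    # Google AI Studio common label
--         "model:": "assistant"
--     }
--
--     for line in lines:
--         matched_role = None
--         for marker, role in role_markers.items():
--             if line.strip().startswith(marker):
--                 matched_role = role
--                 # Remove marker from content
--                 line = line.strip()[len(marker):].strip()
--                 break
--
--         if matched_role:
--             if current_role:
--                 messages.append({"role": current_role, "content": "\n".join(current_content)})
--             current_role = matched_role
--             current_content = [line]
--         else:
--             if current_role:
--                 current_content.append(line)
--
--     if current_role and current_content:
--         messages.append({"role": current_role, "content": "\n".join(current_content)})
--
--     return messages
-- ===== SOURCE B (Python) =====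
-- def parse_text_transcript(text):
--     """
--     Parse a long string containing a transcript (e.g. User: ... AI: ...)
--     Returns a list of dicts with role/content.
--     """
--     lines = text.split('\n')
--
--     # Ordered marker table (first match wins; same order as the original dict)
--     role_markers = [
--         ("User:", "user"),
--         ("Human:", "user"),
--         ("AI:", "assistant"),
--         ("Assistant:", "assistant"),
--         ("System:", "system"),
--         ("Input:", "user"),
--         ("input:", "user"),
--         ("Output:", "assistant"),
--         ("output:", "assistant"),
--         ("Model:", "assistant"),
--         ("model:", "assistant"),
--     ]
--
--     # Pass 1: record the start of each message segment
--     starts = []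
--     for i, line in enumerate(lines):
--         s = line.strip()
--         for marker, role in role_markers:
--             if s.startswith(marker):
--                 starts.append((i, role, s[len(marker):].strip()))
--                 break
--
--     # Pass 2: each segment runs to the next start (raw continuation lines)
--     messages = []
--     for j, (i, role, first) in enumerate(starts):
--         end = starts[j + 1][0] if j + 1 < len(starts) else len(lines)
--         content = "\n".join([first] + lines[i + 1:end])
--         messages.append({"role": role, "content": content})
--     return messages
-- ===== Notes on version B (the rewrite author's own statement) =====
-- stated objective: alternative
-- what changed: Replaces A's single stateful accumulator loop (current_role/current_content mutated line by line) by a two-pass decomposition: pass 1 records each segment start (index, role, stripped first line) from an ordered marker table, pass 2 emits each message by joining the first line with the raw lines up to the next start.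
import Mathlib
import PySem

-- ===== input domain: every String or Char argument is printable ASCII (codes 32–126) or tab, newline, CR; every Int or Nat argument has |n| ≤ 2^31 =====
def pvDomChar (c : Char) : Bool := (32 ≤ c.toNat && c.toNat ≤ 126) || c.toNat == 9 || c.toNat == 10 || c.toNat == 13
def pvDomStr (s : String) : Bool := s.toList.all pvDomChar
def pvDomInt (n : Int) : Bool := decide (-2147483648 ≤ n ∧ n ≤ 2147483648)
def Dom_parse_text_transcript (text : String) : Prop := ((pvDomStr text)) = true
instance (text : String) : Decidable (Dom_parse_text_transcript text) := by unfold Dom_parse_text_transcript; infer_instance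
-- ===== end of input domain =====

-- B replaces A's single stateful accumulator loop by a two-pass decomposition
-- (pass 1 records segment starts, pass 2 joins each start with the raw lines up
-- to the next start); objective: alternative structure, same exact behaviour.

-- ===== PORT A =====
-- the role_markers dict literal of A
def pvRoleMarkersA : PySem.Dict String String :=
  PySem.Dict.empty.insert "User:" "user" |>.insert "Human:" "user"
    |>.insert "AI:" "assistant" |>.insert "Assistant:" "assistant"
    |>.insert "System:" "system" |>.insert "Input:" "user" |>.insert "input:" "user"
    |>.insert "Output:" "assistant" |>.insert "output:" "assistant"
    |>.insert "Model:" "assistant" |>.insert "model:" "assistant"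

-- A's inner 'for marker, role in role_markers.items(): … break' (rebinding line)
def pvMatchA (line : String) : List (String × String) → Option (String × String)
  | [] => none
  | (marker, role) :: rest =>
    if PySem.Str.startswith (PySem.Str.strip line) marker then
      some (role, PySem.Str.strip (PySem.Str.slice (PySem.Str.strip line) (some (PySem.Str.len marker)) none))
    else pvMatchA line rest

-- one iteration of A's main loop; state = (messages, current_role, current_content)
def pvStepA (st : List (List (String × String)) × Option String × List String)
    (line : String) : List (List (String × String)) × Option String × List String :=
  match pvMatchA line pvRoleMarkersA.items with
  | some (role, rest) =>
    match st with
    | (msgs, some r, cc) =>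
        (msgs ++ [[("role", r), ("content", PySem.Str.join "\n" cc)]], some role, [rest])
    | (msgs, none, _cc) => (msgs, some role, [rest])
  | none =>
    match st with
    | (msgs, some r, cc) => (msgs, some r, cc ++ [line])
    | (msgs, none, cc) => (msgs, none, cc)

-- A's trailing 'if current_role and current_content: append'
def pvFinalA (st : List (List (String × String)) × Option String × List String) :
    List (List (String × String)) :=
  match st with
  | (msgs, some r, cc) =>
      if cc.isEmpty then msgs
      else msgs ++ [[("role", r), ("content", PySem.Str.join "\n" cc)]]
  | (msgs, none, _) => msgs

def parse_text_transcript (text : String) : List (List (String × String)) :=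
  let lines := (PySem.Str.split? text "\n").getD []
  pvFinalA (lines.foldl pvStepA ([], none, []))

-- ===== PORT B =====
-- B's ordered marker table (same markers, same order)
def pvRoleMarkersB : List (String × String) :=
  [("User:", "user"), ("Human:", "user"), ("AI:", "assistant"), ("Assistant:", "assistant"),
   ("System:", "system"), ("Input:", "user"), ("input:", "user"), ("Output:", "assistant"),
   ("output:", "assistant"), ("Model:", "assistant"), ("model:", "assistant")]

-- B's inner marker loop over the pre-stripped line s
def pvMatchB (s : String) : List (String × String) → Option (String × String)
  | [] => none
  | (marker, role) :: rest =>
    if PySem.Str.startswith s marker then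
      some (role, PySem.Str.strip (PySem.Str.slice s (some (PySem.Str.len marker)) none))
    else pvMatchB s rest

-- pass 1: record (index, role, stripped first line) for every marker line
def pvStarts (lines : List String) : List (Int × String × String) :=
  (PySem.List.enumerate lines).foldl
    (fun acc p =>
      match pvMatchB (PySem.Str.strip p.2) pvRoleMarkersB with
      | some (role, first) => acc ++ [(p.1, role, first)]
      | none => acc) []

-- pass 2: each segment runs to the next recorded start (raw continuation lines)
def pvBuild (lines : List String) : List (Int × String × String) → List (List (String × String))
  | [] => []
  | (i, role, first) :: rest =>
    let e : Int := match rest with | [] => (lines.length : Int) | (i2, _, _) :: _ => i2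
    [("role", role),
     ("content", PySem.Str.join "\n" (first :: PySem.List.slice lines (some (i + 1)) (some e)))]
      :: pvBuild lines rest

def parse_text_transcript_alt (text : String) : List (List (String × String)) :=
  let lines := (PySem.Str.split? text "\n").getD []
  pvBuild lines (pvStarts lines)

-- ===== PRECONDITION & SPEC =====
def Spec_parse_text_transcript (text : String) (out : List (List (String × String))) : Prop := out = parse_text_transcript_alt text
instance (text : String) (out : List (List (String × String))) : Decidable (Spec_parse_text_transcript text out) := by unfold Spec_parse_text_transcript; infer_instance

-- ===== CLAIM (what is proved, stated in full; the proofs are below) =====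
def Claim_equal_parse_text_transcript : Prop := ∀ (text : String), Dom_parse_text_transcript text → Spec_parse_text_transcript text (parse_text_transcript text)

-- ===== LEMMAS AND PROOFS =====

-- both ports test a line against the same ordered marker table
theorem pv_itemsA : pvRoleMarkersA.items = pvRoleMarkersB := by decide

theorem pv_matchAB (l : String) (ms : List (String × String)) :
    pvMatchA l ms = pvMatchB (PySem.Str.strip l) ms := by
  induction ms with
  | nil => rfl
  | cons p rest ih => cases p with | mk marker role => simp [pvMatchA, pvMatchB, ih]

-- the per-line marker test both ports agree on
def pvM (l : String) : Option (String × String) :=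
  pvMatchB (PySem.Str.strip l) pvRoleMarkersB

theorem pv_stepA_eq (st) (l : String) :
    pvStepA st l =
      match pvM l with
      | some (role, rest) =>
        match st with
        | (msgs, some r, cc) =>
            (msgs ++ [[("role", r), ("content", PySem.Str.join "\n" cc)]], some role, [rest])
        | (msgs, none, _cc) => (msgs, some role, [rest])
      | none =>
        match st with
        | (msgs, some r, cc) => (msgs, some r, cc ++ [l])
        | (msgs, none, cc) => (msgs, none, cc) := by
  simp only [pvStepA, pv_itemsA, pv_matchAB, pvM]

-- the messages A's loop still produces from state cur on the remaining lines
def pvProcA : List String → Option (String × List String) → List (List (String × String))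
  | [], none => []
  | [], some (r, cc) =>
      if cc.isEmpty then [] else [[("role", r), ("content", PySem.Str.join "\n" cc)]]
  | l :: ls, cur =>
    match pvM l with
    | some (role, first) =>
      match cur with
      | some (r, cc) =>
          [("role", r), ("content", PySem.Str.join "\n" cc)] :: pvProcA ls (some (role, [first]))
      | none => pvProcA ls (some (role, [first]))
    | none =>
      match cur with
      | some (r, cc) => pvProcA ls (some (r, cc ++ [l]))
      | none => pvProcA ls none

theorem pv_foldA (ls : List String) :
    (∀ msgs r cc, pvFinalA (ls.foldl pvStepA (msgs, some r, cc))
        = msgs ++ pvProcA ls (some (r, cc)))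
    ∧ (∀ msgs cc, pvFinalA (ls.foldl pvStepA (msgs, none, cc))
        = msgs ++ pvProcA ls none) := by
  induction ls with
  | nil =>
    refine ⟨fun msgs r cc => ?_, fun msgs cc => ?_⟩
    · simp only [List.foldl_nil, pvFinalA, pvProcA]
      split_ifs <;> simp
    · simp [pvFinalA, pvProcA]
  | cons l ls ih =>
    refine ⟨fun msgs r cc => ?_, fun msgs cc => ?_⟩ <;>
    · simp only [List.foldl_cons, pv_stepA_eq]
      cases hm : pvM l with
      | some p =>
        cases p with | mk role first =>
        simp only [pvProcA, hm, ih.1, List.append_assoc, List.singleton_append]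
      | none => simp only [pvProcA, hm, ih.1, ih.2]

-- pass 1 of B as a structural recursion with a running index
def pvStartsAux (k : Int) : List String → List (Int × String × String)
  | [] => []
  | l :: ls =>
    match pvM l with
    | some (role, first) => (k, role, first) :: pvStartsAux (k + 1) ls
    | none => pvStartsAux (k + 1) ls

theorem pv_starts_fold (ls : List String) :
    ∀ (k : Int) (acc : List (Int × String × String)),
      (PySem.List.enumerate ls k).foldl
        (fun acc p =>
          match pvMatchB (PySem.Str.strip p.2) pvRoleMarkersB with
          | some (role, first) => acc ++ [(p.1, role, first)]
          | none => acc) acc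
      = acc ++ pvStartsAux k ls := by
  induction ls with
  | nil => intro k acc; simp [PySem.List.enumerate_nil, pvStartsAux]
  | cons l ls ih =>
    intro k acc
    rw [PySem.List.enumerate_cons, List.foldl_cons]
    show (PySem.List.enumerate ls (k + 1)).foldl _
        (match pvM l with
         | some (role, first) => acc ++ [(k, role, first)]
         | none => acc) = _
    cases hm : pvM l with
    | some p =>
      cases p with | mk role first =>
      simp only [pvStartsAux, hm, ih, List.append_assoc, List.singleton_append]
    | none => simp only [pvStartsAux, hm, ih]

theorem pv_starts_idx (ls : List String) :
    ∀ (k : Nat) (p : Int × String × String), p ∈ pvStartsAux (k : Int) ls →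
      ∃ j : Nat, p.1 = (j : Int) ∧ k ≤ j := by
  induction ls with
  | nil => intro k p hp; simp [pvStartsAux] at hp
  | cons l ls ih =>
    intro k p hp
    have hcast : (k : Int) + 1 = ((k + 1 : Nat) : Int) := by push_cast; ring
    simp only [pvStartsAux] at hp
    cases hm : pvM l with
    | some q =>
      cases q with | mk role first =>
      rw [hm] at hp
      rcases List.mem_cons.1 hp with h | h
      · exact ⟨k, by rw [h], le_refl k⟩
      · rw [hcast] at h
        rcases ih (k + 1) p h with ⟨j, hj, hk⟩
        exact ⟨j, hj, by omega⟩
    | none =>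
      rw [hm, hcast] at hp
      rcases ih (k + 1) p hp with ⟨j, hj, hk⟩
      exact ⟨j, hj, by omega⟩

-- a slice from k to the length is the k-th suffix
theorem pv_slice_to_len {α : Type} (lines : List α) (k : Nat) :
    PySem.List.slice lines (some (k : Int)) (some (lines.length : Int)) = lines.drop k := by
  rw [PySem.List.slice_natCast]
  exact List.take_of_length_le (by simp)

-- a slice at a cons boundary peels the head line
theorem pv_slice_cons {α : Type} (lines : List α) (k j : Nat) (l : α) (ls : List α)
    (h : lines.drop k = l :: ls) (hj : k + 1 ≤ j) :
    PySem.List.slice lines (some (k : Int)) (some (j : Int))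
      = l :: PySem.List.slice lines (some ((k + 1 : Nat) : Int)) (some (j : Int)) := by
  rw [PySem.List.slice_natCast, PySem.List.slice_natCast, h]
  have hdrop : lines.drop (k + 1) = ls := by
    rw [← List.drop_drop, h]; rfl
  rw [hdrop]
  have : j - k = (j - (k + 1)) + 1 := by omega
  rw [this, List.take_succ_cons]

-- the heart of the equivalence: A's remaining-loop output is B's pass 2 on
-- the remaining recorded starts
theorem pv_main (lines : List String) :
    ∀ (ls : List String) (k : Nat), lines.drop k = ls →
      (pvProcA ls none = pvBuild lines (pvStartsAux (k : Int) ls))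
      ∧ (∀ r cc, cc ≠ [] →
          pvProcA ls (some (r, cc)) =
            match pvStartsAux (k : Int) ls with
            | [] => [[("role", r), ("content", PySem.Str.join "\n" (cc ++ ls))]]
            | (i2, _, _) :: _ =>
                [("role", r), ("content", PySem.Str.join "\n"
                    (cc ++ PySem.List.slice lines (some (k : Int)) (some i2)))]
                  :: pvBuild lines (pvStartsAux (k : Int) ls)) := by
  intro ls
  induction ls with
  | nil =>
    intro k h
    refine ⟨by simp [pvProcA, pvStartsAux, pvBuild], fun r cc hcc => ?_⟩
    simp only [pvStartsAux, pvProcA, List.append_nil]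
    rw [if_neg (by simpa [List.isEmpty_iff] using hcc)]
  | cons l ls ih =>
    intro k h
    have hcast : (k : Int) + 1 = ((k + 1 : Nat) : Int) := by push_cast; ring
    have hdrop : lines.drop (k + 1) = ls := by
      rw [← List.drop_drop, h]; rfl
    have IH := ih (k + 1) hdrop
    cases hm : pvM l with
    | none =>
      have hs : pvStartsAux (k : Int) (l :: ls) = pvStartsAux ((k + 1 : Nat) : Int) ls := by
        simp only [pvStartsAux, hm, hcast]
      refine ⟨?_, fun r cc hcc => ?_⟩
      · simp only [pvProcA, hm, hs, IH.1]
      · simp only [pvProcA, hm, hs]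
        rw [IH.2 r (cc ++ [l]) (by simp)]
        cases hrest : pvStartsAux ((k + 1 : Nat) : Int) ls with
        | nil => simp
        | cons p rest =>
          obtain ⟨i2, role2, first2⟩ := p
          have hj : ∃ j : Nat, i2 = (j : Int) ∧ k + 1 ≤ j := by
            have := pv_starts_idx ls (k + 1) (i2, role2, first2) (by rw [hrest]; exact List.mem_cons_self)
            simpa using this
          rcases hj with ⟨j, rfl, hjk⟩
          dsimp only
          rw [pv_slice_cons lines k j l ls h hjk]
          simp
    | some p =>
      obtain ⟨role, first⟩ := p
      have hs : pvStartsAux (k : Int) (l :: ls)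
          = ((k : Int), role, first) :: pvStartsAux ((k + 1 : Nat) : Int) ls := by
        simp only [pvStartsAux, hm, hcast]
      -- the segment opened at line k, rendered by pass 2
      have hseg : pvProcA ls (some (role, [first]))
          = pvBuild lines (((k : Int), role, first) :: pvStartsAux ((k + 1 : Nat) : Int) ls) := by
        rw [IH.2 role [first] (by simp)]
        cases hrest : pvStartsAux ((k + 1 : Nat) : Int) ls with
        | nil =>
          simp only [pvBuild]
          rw [show (k : Int) + 1 = ((k + 1 : Nat) : Int) from hcast,
              pv_slice_to_len lines (k + 1), hdrop]
          simp
        | cons q rest =>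
          obtain ⟨i2, role2, first2⟩ := q
          simp only [pvBuild]
          rw [show (k : Int) + 1 = ((k + 1 : Nat) : Int) from hcast]
          simp
      refine ⟨?_, fun r cc hcc => ?_⟩
      · simp only [pvProcA, hm, hs]
        exact hseg
      · simp only [pvProcA, hm, hs]
        rw [hseg]
        have hkk : PySem.List.slice lines (some (k : Int)) (some (k : Int)) = [] := by
          rw [PySem.List.slice_natCast]; simp
        rw [hkk]
        simp

-- ===== VERDICT (by name: the statement is the Claim_ definition above) =====
theorem parse_text_transcript_spec : Claim_equal_parse_text_transcript := by
  intro text _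
  unfold Spec_parse_text_transcript parse_text_transcript parse_text_transcript_alt pvStarts
  have h1 := (pv_foldA ((PySem.Str.split? text "\n").getD [])).2 [] []
  have h2 := (pv_main ((PySem.Str.split? text "\n").getD [])
      ((PySem.Str.split? text "\n").getD []) 0 (by simp)).1
  rw [Int.natCast_zero] at h2
  have h3 := pv_starts_fold ((PySem.Str.split? text "\n").getD []) 0 []
  simp only [List.nil_append] at h1 h3
  exact h1.trans (h2.trans (congrArg _ h3.symm))
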